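-- pv_equiv track=rewrite | github.com/NguyenHuy1903/vllm-autotuner | backend/heuristic.py | _round_to_power_of_2
-- ===== SOURCE A (Python) =====
-- def _round_to_power_of_2(value: int, min_val: int = 1, max_val: int = 512) -> int:
--     """Làm tròn xuống lũy thừa 2 gần nhất trong khoảng [min_val, max_val]."""
--     if value <= 0:
--         return min_val
--     powers = [1, 2, 4, 8, 16, 32, 64, 128, 256, 512]
--     result = min_val
--     for p in powers:
--         if p <= value and min_val <= p <= max_val:
--             result = p
--     return result
-- ===== SOURCE B (Python) =====
-- def _round_to_power_of_2(value: int, min_val: int = 1, max_val: int = 512) -> int: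
--     """Lam tron xuong luy thua 2 gan nhat trong khoang [min_val, max_val]."""
--     if value <= 0:
--         return min_val
--     cap = min(value, max_val, 512)
--     if cap < 1:
--         return min_val
--     p = 1 << (cap.bit_length() - 1)
--     return p if p >= min_val else min_val
-- ===== Notes on version B (the rewrite author's own statement) =====
-- stated objective: idiomatic
-- what changed: Replaces the hard-coded powers list and linear scan by a direct bit_length computation of the largest power of two <= min(value, max_val, 512), clamped below by min_val.
import Mathlib
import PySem

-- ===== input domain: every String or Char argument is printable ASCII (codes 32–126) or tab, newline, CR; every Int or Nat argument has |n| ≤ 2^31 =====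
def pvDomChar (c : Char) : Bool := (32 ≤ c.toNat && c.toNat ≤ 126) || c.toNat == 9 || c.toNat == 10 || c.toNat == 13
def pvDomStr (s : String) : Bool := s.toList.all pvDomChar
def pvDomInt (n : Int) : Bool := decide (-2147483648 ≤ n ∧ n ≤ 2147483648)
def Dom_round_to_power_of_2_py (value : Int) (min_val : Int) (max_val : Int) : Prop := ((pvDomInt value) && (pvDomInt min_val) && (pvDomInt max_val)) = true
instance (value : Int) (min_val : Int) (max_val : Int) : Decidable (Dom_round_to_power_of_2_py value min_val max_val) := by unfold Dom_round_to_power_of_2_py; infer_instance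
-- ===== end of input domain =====

-- B replaces A's hard-coded powers list and linear scan by a direct bit_length
-- computation of the largest power of two ≤ min(value, max_val, 512); idiomatic, same cost.


-- ===== PORT A =====
def round_to_power_of_2_py (value : Int) (min_val : Int) (max_val : Int) : Int :=
  if value ≤ 0 then min_val
  else
    let powers : List Int := [1, 2, 4, 8, 16, 32, 64, 128, 256, 512]
    powers.foldl (fun result p => if p ≤ value ∧ min_val ≤ p ∧ p ≤ max_val then p else result) min_val

-- ===== PORT B =====
-- Python's int.bit_length for nonnegative ints: 0 for 0, else number of binary digits
def pyBitLength (n : Nat) : Nat :=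
  if h : n = 0 then 0 else pyBitLength (n / 2) + 1
decreasing_by exact Nat.div_lt_self (Nat.pos_of_ne_zero h) (by norm_num)

def round_to_power_of_2_py_alt (value : Int) (min_val : Int) (max_val : Int) : Int :=
  if value ≤ 0 then min_val
  else
    let cap := min value (min max_val 512)
    if cap < 1 then min_val
    else
      -- 1 << m on a Python int is exactly 2 ^ m
      let p : Int := 2 ^ (pyBitLength cap.toNat - 1)
      if min_val ≤ p then p else min_val

-- ===== PRECONDITION & SPEC =====
def Spec_round_to_power_of_2_py (value : Int) (min_val : Int) (max_val : Int) (out : Int) : Prop := out = round_to_power_of_2_py_alt value min_val max_val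
instance (value : Int) (min_val : Int) (max_val : Int) (out : Int) : Decidable (Spec_round_to_power_of_2_py value min_val max_val out) := by unfold Spec_round_to_power_of_2_py; infer_instance

-- ===== CLAIM (what is proved, stated in full; the proofs are below) =====
def Claim_equal_round_to_power_of_2_py : Prop := ∀ (value : Int) (min_val : Int) (max_val : Int), Dom_round_to_power_of_2_py value min_val max_val → Spec_round_to_power_of_2_py value min_val max_val (round_to_power_of_2_py value min_val max_val)

-- ===== LEMMAS AND PROOFS =====
theorem pyBitLength_pos (n : Nat) (h : 1 ≤ n) : 1 ≤ pyBitLength n := by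
  rw [pyBitLength]
  simp [Nat.one_le_iff_ne_zero.mp h]

theorem pyBitLength_bounds (n : Nat) (h1 : 1 ≤ n) :
    2 ^ (pyBitLength n - 1) ≤ n ∧ n < 2 ^ pyBitLength n := by
  induction n using Nat.strong_induction_on with
  | _ n ih =>
    rw [pyBitLength]
    have hne : n ≠ 0 := by omega
    simp only [hne, dif_neg, not_false_iff]
    by_cases h2 : n ≤ 1
    · have : n = 1 := by omega
      subst this
      have : pyBitLength (1 / 2) = 0 := by rw [pyBitLength]; simp
      rw [this]; decide
    · have hd : 1 ≤ n / 2 := by omega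
      obtain ⟨ihl, ihr⟩ := ih (n / 2) (by omega) hd
      have hk1 : 1 ≤ pyBitLength (n / 2) := pyBitLength_pos _ hd
      set k := pyBitLength (n / 2) with hk
      have e1 : 2 ^ k = 2 * 2 ^ (k - 1) := by
        conv_lhs => rw [show k = (k - 1) + 1 by omega]
        ring
      have e2 : 2 ^ (k + 1) = 2 * 2 ^ k := by ring
      constructor
      · simp only [Nat.add_sub_cancel]; omega
      · omega

-- ===== VERDICT (by name: the statement is the Claim_ definition above) =====

theorem round_to_power_of_2_py_spec : Claim_equal_round_to_power_of_2_py := by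
  intro value min_val max_val _
  unfold Spec_round_to_power_of_2_py round_to_power_of_2_py round_to_power_of_2_py_alt
  by_cases hv : value ≤ 0
  · simp [hv]
  · simp only [if_neg hv, List.foldl]
    set cap := min value (min max_val 512) with hcap
    by_cases hc : cap < 1
    · simp only [if_pos hc]
      rw [if_neg (show ¬((512:Int) ≤ value ∧ min_val ≤ 512 ∧ 512 ≤ max_val) from by omega),
    if_neg (show ¬((256:Int) ≤ value ∧ min_val ≤ 256 ∧ 256 ≤ max_val) from by omega),
    if_neg (show ¬((128:Int) ≤ value ∧ min_val ≤ 128 ∧ 128 ≤ max_val) from by omega),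
    if_neg (show ¬((64:Int) ≤ value ∧ min_val ≤ 64 ∧ 64 ≤ max_val) from by omega),
    if_neg (show ¬((32:Int) ≤ value ∧ min_val ≤ 32 ∧ 32 ≤ max_val) from by omega),
    if_neg (show ¬((16:Int) ≤ value ∧ min_val ≤ 16 ∧ 16 ≤ max_val) from by omega),
    if_neg (show ¬((8:Int) ≤ value ∧ min_val ≤ 8 ∧ 8 ≤ max_val) from by omega),
    if_neg (show ¬((4:Int) ≤ value ∧ min_val ≤ 4 ∧ 4 ≤ max_val) from by omega),
    if_neg (show ¬((2:Int) ≤ value ∧ min_val ≤ 2 ∧ 2 ≤ max_val) from by omega),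
    if_neg (show ¬((1:Int) ≤ value ∧ min_val ≤ 1 ∧ 1 ≤ max_val) from by omega)]
    · simp only [if_neg hc]
      have h1 : (1 : Int) ≤ cap := by omega
      have h512 : cap ≤ 512 := by omega
      have hnat1 : 1 ≤ cap.toNat := by omega
      obtain ⟨hb1, hb2⟩ := pyBitLength_bounds cap.toNat hnat1
      have hk1 : 1 ≤ pyBitLength cap.toNat := pyBitLength_pos _ hnat1
      have hk10 : pyBitLength cap.toNat ≤ 10 := by
        by_contra hgt
        have h10 : 2 ^ 10 ≤ 2 ^ (pyBitLength cap.toNat - 1) :=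
          Nat.pow_le_pow_right (by norm_num) (by omega)
        have : (1024 : Nat) ≤ cap.toNat := le_trans h10 hb1
        omega
      have hcb1 : (2 : Int) ^ (pyBitLength cap.toNat - 1) ≤ cap := by
        have hpos := Int.toNat_of_nonneg (by omega : (0 : Int) ≤ cap)
        calc ((2 : Int)) ^ (pyBitLength cap.toNat - 1)
            = ((2 ^ (pyBitLength cap.toNat - 1) : Nat) : Int) := by push_cast; ring
          _ ≤ (cap.toNat : Int) := by exact_mod_cast hb1
          _ = cap := hpos
      have hcb2 : cap < (2 : Int) ^ pyBitLength cap.toNat := by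
        have hpos := Int.toNat_of_nonneg (by omega : (0 : Int) ≤ cap)
        calc cap = (cap.toNat : Int) := hpos.symm
          _ < ((2 ^ pyBitLength cap.toNat : Nat) : Int) := by exact_mod_cast hb2
          _ = (2 : Int) ^ pyBitLength cap.toNat := by push_cast; ring
      clear hb1 hb2 hnat1
      generalize hgk : pyBitLength cap.toNat = k at hcb1 hcb2 hk1 hk10 ⊢
      clear hgk
      interval_cases k
      · -- k = 1
        norm_num at hcb1 hcb2
        rw [show ((2:Int) ^ (1 - 1)) = 1 from by norm_num]
        rw [if_neg (show ¬((512:Int) ≤ value ∧ min_val ≤ 512 ∧ 512 ≤ max_val) from by omega),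
            if_neg (show ¬((256:Int) ≤ value ∧ min_val ≤ 256 ∧ 256 ≤ max_val) from by omega),
            if_neg (show ¬((128:Int) ≤ value ∧ min_val ≤ 128 ∧ 128 ≤ max_val) from by omega),
            if_neg (show ¬((64:Int) ≤ value ∧ min_val ≤ 64 ∧ 64 ≤ max_val) from by omega),
            if_neg (show ¬((32:Int) ≤ value ∧ min_val ≤ 32 ∧ 32 ≤ max_val) from by omega),
            if_neg (show ¬((16:Int) ≤ value ∧ min_val ≤ 16 ∧ 16 ≤ max_val) from by omega),
            if_neg (show ¬((8:Int) ≤ value ∧ min_val ≤ 8 ∧ 8 ≤ max_val) from by omega),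
            if_neg (show ¬((4:Int) ≤ value ∧ min_val ≤ 4 ∧ 4 ≤ max_val) from by omega),
            if_neg (show ¬((2:Int) ≤ value ∧ min_val ≤ 2 ∧ 2 ≤ max_val) from by omega)]
        by_cases hm : min_val ≤ (1:Int)
        · rw [if_pos ((⟨by omega, by omega, by omega⟩ : ((1:Int) ≤ value ∧ min_val ≤ 1 ∧ 1 ≤ max_val))), if_pos hm]
        · rw [if_neg (show ¬((1:Int) ≤ value ∧ min_val ≤ 1 ∧ 1 ≤ max_val) from by omega), if_neg hm]
      · -- k = 2
        norm_num at hcb1 hcb2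
        rw [show ((2:Int) ^ (2 - 1)) = 2 from by norm_num]
        rw [if_neg (show ¬((512:Int) ≤ value ∧ min_val ≤ 512 ∧ 512 ≤ max_val) from by omega),
            if_neg (show ¬((256:Int) ≤ value ∧ min_val ≤ 256 ∧ 256 ≤ max_val) from by omega),
            if_neg (show ¬((128:Int) ≤ value ∧ min_val ≤ 128 ∧ 128 ≤ max_val) from by omega),
            if_neg (show ¬((64:Int) ≤ value ∧ min_val ≤ 64 ∧ 64 ≤ max_val) from by omega),
            if_neg (show ¬((32:Int) ≤ value ∧ min_val ≤ 32 ∧ 32 ≤ max_val) from by omega),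
            if_neg (show ¬((16:Int) ≤ value ∧ min_val ≤ 16 ∧ 16 ≤ max_val) from by omega),
            if_neg (show ¬((8:Int) ≤ value ∧ min_val ≤ 8 ∧ 8 ≤ max_val) from by omega),
            if_neg (show ¬((4:Int) ≤ value ∧ min_val ≤ 4 ∧ 4 ≤ max_val) from by omega)]
        by_cases hm : min_val ≤ (2:Int)
        · rw [if_pos ((⟨by omega, by omega, by omega⟩ : ((2:Int) ≤ value ∧ min_val ≤ 2 ∧ 2 ≤ max_val))), if_pos hm]
        · rw [if_neg (show ¬((2:Int) ≤ value ∧ min_val ≤ 2 ∧ 2 ≤ max_val) from by omega),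
              if_neg (show ¬((1:Int) ≤ value ∧ min_val ≤ 1 ∧ 1 ≤ max_val) from by omega), if_neg hm]
      · -- k = 3
        norm_num at hcb1 hcb2
        rw [show ((2:Int) ^ (3 - 1)) = 4 from by norm_num]
        rw [if_neg (show ¬((512:Int) ≤ value ∧ min_val ≤ 512 ∧ 512 ≤ max_val) from by omega),
            if_neg (show ¬((256:Int) ≤ value ∧ min_val ≤ 256 ∧ 256 ≤ max_val) from by omega),
            if_neg (show ¬((128:Int) ≤ value ∧ min_val ≤ 128 ∧ 128 ≤ max_val) from by omega),
            if_neg (show ¬((64:Int) ≤ value ∧ min_val ≤ 64 ∧ 64 ≤ max_val) from by omega),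
            if_neg (show ¬((32:Int) ≤ value ∧ min_val ≤ 32 ∧ 32 ≤ max_val) from by omega),
            if_neg (show ¬((16:Int) ≤ value ∧ min_val ≤ 16 ∧ 16 ≤ max_val) from by omega),
            if_neg (show ¬((8:Int) ≤ value ∧ min_val ≤ 8 ∧ 8 ≤ max_val) from by omega)]
        by_cases hm : min_val ≤ (4:Int)
        · rw [if_pos ((⟨by omega, by omega, by omega⟩ : ((4:Int) ≤ value ∧ min_val ≤ 4 ∧ 4 ≤ max_val))), if_pos hm]
        · rw [if_neg (show ¬((4:Int) ≤ value ∧ min_val ≤ 4 ∧ 4 ≤ max_val) from by omega),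
              if_neg (show ¬((2:Int) ≤ value ∧ min_val ≤ 2 ∧ 2 ≤ max_val) from by omega),
              if_neg (show ¬((1:Int) ≤ value ∧ min_val ≤ 1 ∧ 1 ≤ max_val) from by omega), if_neg hm]
      · -- k = 4
        norm_num at hcb1 hcb2
        rw [show ((2:Int) ^ (4 - 1)) = 8 from by norm_num]
        rw [if_neg (show ¬((512:Int) ≤ value ∧ min_val ≤ 512 ∧ 512 ≤ max_val) from by omega),
            if_neg (show ¬((256:Int) ≤ value ∧ min_val ≤ 256 ∧ 256 ≤ max_val) from by omega),
            if_neg (show ¬((128:Int) ≤ value ∧ min_val ≤ 128 ∧ 128 ≤ max_val) from by omega),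
            if_neg (show ¬((64:Int) ≤ value ∧ min_val ≤ 64 ∧ 64 ≤ max_val) from by omega),
            if_neg (show ¬((32:Int) ≤ value ∧ min_val ≤ 32 ∧ 32 ≤ max_val) from by omega),
            if_neg (show ¬((16:Int) ≤ value ∧ min_val ≤ 16 ∧ 16 ≤ max_val) from by omega)]
        by_cases hm : min_val ≤ (8:Int)
        · rw [if_pos ((⟨by omega, by omega, by omega⟩ : ((8:Int) ≤ value ∧ min_val ≤ 8 ∧ 8 ≤ max_val))), if_pos hm]
        · rw [if_neg (show ¬((8:Int) ≤ value ∧ min_val ≤ 8 ∧ 8 ≤ max_val) from by omega),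
              if_neg (show ¬((4:Int) ≤ value ∧ min_val ≤ 4 ∧ 4 ≤ max_val) from by omega),
              if_neg (show ¬((2:Int) ≤ value ∧ min_val ≤ 2 ∧ 2 ≤ max_val) from by omega),
              if_neg (show ¬((1:Int) ≤ value ∧ min_val ≤ 1 ∧ 1 ≤ max_val) from by omega), if_neg hm]
      · -- k = 5
        norm_num at hcb1 hcb2
        rw [show ((2:Int) ^ (5 - 1)) = 16 from by norm_num]
        rw [if_neg (show ¬((512:Int) ≤ value ∧ min_val ≤ 512 ∧ 512 ≤ max_val) from by omega),
            if_neg (show ¬((256:Int) ≤ value ∧ min_val ≤ 256 ∧ 256 ≤ max_val) from by omega),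
            if_neg (show ¬((128:Int) ≤ value ∧ min_val ≤ 128 ∧ 128 ≤ max_val) from by omega),
            if_neg (show ¬((64:Int) ≤ value ∧ min_val ≤ 64 ∧ 64 ≤ max_val) from by omega),
            if_neg (show ¬((32:Int) ≤ value ∧ min_val ≤ 32 ∧ 32 ≤ max_val) from by omega)]
        by_cases hm : min_val ≤ (16:Int)
        · rw [if_pos ((⟨by omega, by omega, by omega⟩ : ((16:Int) ≤ value ∧ min_val ≤ 16 ∧ 16 ≤ max_val))), if_pos hm]
        · rw [if_neg (show ¬((16:Int) ≤ value ∧ min_val ≤ 16 ∧ 16 ≤ max_val) from by omega),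
              if_neg (show ¬((8:Int) ≤ value ∧ min_val ≤ 8 ∧ 8 ≤ max_val) from by omega),
              if_neg (show ¬((4:Int) ≤ value ∧ min_val ≤ 4 ∧ 4 ≤ max_val) from by omega),
              if_neg (show ¬((2:Int) ≤ value ∧ min_val ≤ 2 ∧ 2 ≤ max_val) from by omega),
              if_neg (show ¬((1:Int) ≤ value ∧ min_val ≤ 1 ∧ 1 ≤ max_val) from by omega), if_neg hm]
      · -- k = 6
        norm_num at hcb1 hcb2
        rw [show ((2:Int) ^ (6 - 1)) = 32 from by norm_num]
        rw [if_neg (show ¬((512:Int) ≤ value ∧ min_val ≤ 512 ∧ 512 ≤ max_val) from by omega),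
            if_neg (show ¬((256:Int) ≤ value ∧ min_val ≤ 256 ∧ 256 ≤ max_val) from by omega),
            if_neg (show ¬((128:Int) ≤ value ∧ min_val ≤ 128 ∧ 128 ≤ max_val) from by omega),
            if_neg (show ¬((64:Int) ≤ value ∧ min_val ≤ 64 ∧ 64 ≤ max_val) from by omega)]
        by_cases hm : min_val ≤ (32:Int)
        · rw [if_pos ((⟨by omega, by omega, by omega⟩ : ((32:Int) ≤ value ∧ min_val ≤ 32 ∧ 32 ≤ max_val))), if_pos hm]
        · rw [if_neg (show ¬((32:Int) ≤ value ∧ min_val ≤ 32 ∧ 32 ≤ max_val) from by omega),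
              if_neg (show ¬((16:Int) ≤ value ∧ min_val ≤ 16 ∧ 16 ≤ max_val) from by omega),
              if_neg (show ¬((8:Int) ≤ value ∧ min_val ≤ 8 ∧ 8 ≤ max_val) from by omega),
              if_neg (show ¬((4:Int) ≤ value ∧ min_val ≤ 4 ∧ 4 ≤ max_val) from by omega),
              if_neg (show ¬((2:Int) ≤ value ∧ min_val ≤ 2 ∧ 2 ≤ max_val) from by omega),
              if_neg (show ¬((1:Int) ≤ value ∧ min_val ≤ 1 ∧ 1 ≤ max_val) from by omega), if_neg hm]
      · -- k = 7
        norm_num at hcb1 hcb2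
        rw [show ((2:Int) ^ (7 - 1)) = 64 from by norm_num]
        rw [if_neg (show ¬((512:Int) ≤ value ∧ min_val ≤ 512 ∧ 512 ≤ max_val) from by omega),
            if_neg (show ¬((256:Int) ≤ value ∧ min_val ≤ 256 ∧ 256 ≤ max_val) from by omega),
            if_neg (show ¬((128:Int) ≤ value ∧ min_val ≤ 128 ∧ 128 ≤ max_val) from by omega)]
        by_cases hm : min_val ≤ (64:Int)
        · rw [if_pos ((⟨by omega, by omega, by omega⟩ : ((64:Int) ≤ value ∧ min_val ≤ 64 ∧ 64 ≤ max_val))), if_pos hm]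
        · rw [if_neg (show ¬((64:Int) ≤ value ∧ min_val ≤ 64 ∧ 64 ≤ max_val) from by omega),
              if_neg (show ¬((32:Int) ≤ value ∧ min_val ≤ 32 ∧ 32 ≤ max_val) from by omega),
              if_neg (show ¬((16:Int) ≤ value ∧ min_val ≤ 16 ∧ 16 ≤ max_val) from by omega),
              if_neg (show ¬((8:Int) ≤ value ∧ min_val ≤ 8 ∧ 8 ≤ max_val) from by omega),
              if_neg (show ¬((4:Int) ≤ value ∧ min_val ≤ 4 ∧ 4 ≤ max_val) from by omega),
              if_neg (show ¬((2:Int) ≤ value ∧ min_val ≤ 2 ∧ 2 ≤ max_val) from by omega),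
              if_neg (show ¬((1:Int) ≤ value ∧ min_val ≤ 1 ∧ 1 ≤ max_val) from by omega), if_neg hm]
      · -- k = 8
        norm_num at hcb1 hcb2
        rw [show ((2:Int) ^ (8 - 1)) = 128 from by norm_num]
        rw [if_neg (show ¬((512:Int) ≤ value ∧ min_val ≤ 512 ∧ 512 ≤ max_val) from by omega),
            if_neg (show ¬((256:Int) ≤ value ∧ min_val ≤ 256 ∧ 256 ≤ max_val) from by omega)]
        by_cases hm : min_val ≤ (128:Int)
        · rw [if_pos ((⟨by omega, by omega, by omega⟩ : ((128:Int) ≤ value ∧ min_val ≤ 128 ∧ 128 ≤ max_val))), if_pos hm]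
        · rw [if_neg (show ¬((128:Int) ≤ value ∧ min_val ≤ 128 ∧ 128 ≤ max_val) from by omega),
              if_neg (show ¬((64:Int) ≤ value ∧ min_val ≤ 64 ∧ 64 ≤ max_val) from by omega),
              if_neg (show ¬((32:Int) ≤ value ∧ min_val ≤ 32 ∧ 32 ≤ max_val) from by omega),
              if_neg (show ¬((16:Int) ≤ value ∧ min_val ≤ 16 ∧ 16 ≤ max_val) from by omega),
              if_neg (show ¬((8:Int) ≤ value ∧ min_val ≤ 8 ∧ 8 ≤ max_val) from by omega),
              if_neg (show ¬((4:Int) ≤ value ∧ min_val ≤ 4 ∧ 4 ≤ max_val) from by omega),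
              if_neg (show ¬((2:Int) ≤ value ∧ min_val ≤ 2 ∧ 2 ≤ max_val) from by omega),
              if_neg (show ¬((1:Int) ≤ value ∧ min_val ≤ 1 ∧ 1 ≤ max_val) from by omega), if_neg hm]
      · -- k = 9
        norm_num at hcb1 hcb2
        rw [show ((2:Int) ^ (9 - 1)) = 256 from by norm_num]
        rw [if_neg (show ¬((512:Int) ≤ value ∧ min_val ≤ 512 ∧ 512 ≤ max_val) from by omega)]
        by_cases hm : min_val ≤ (256:Int)
        · rw [if_pos ((⟨by omega, by omega, by omega⟩ : ((256:Int) ≤ value ∧ min_val ≤ 256 ∧ 256 ≤ max_val))), if_pos hm]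
        · rw [if_neg (show ¬((256:Int) ≤ value ∧ min_val ≤ 256 ∧ 256 ≤ max_val) from by omega),
              if_neg (show ¬((128:Int) ≤ value ∧ min_val ≤ 128 ∧ 128 ≤ max_val) from by omega),
              if_neg (show ¬((64:Int) ≤ value ∧ min_val ≤ 64 ∧ 64 ≤ max_val) from by omega),
              if_neg (show ¬((32:Int) ≤ value ∧ min_val ≤ 32 ∧ 32 ≤ max_val) from by omega),
              if_neg (show ¬((16:Int) ≤ value ∧ min_val ≤ 16 ∧ 16 ≤ max_val) from by omega),
              if_neg (show ¬((8:Int) ≤ value ∧ min_val ≤ 8 ∧ 8 ≤ max_val) from by omega),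
              if_neg (show ¬((4:Int) ≤ value ∧ min_val ≤ 4 ∧ 4 ≤ max_val) from by omega),
              if_neg (show ¬((2:Int) ≤ value ∧ min_val ≤ 2 ∧ 2 ≤ max_val) from by omega),
              if_neg (show ¬((1:Int) ≤ value ∧ min_val ≤ 1 ∧ 1 ≤ max_val) from by omega), if_neg hm]
      · -- k = 10
        norm_num at hcb1 hcb2
        rw [show ((2:Int) ^ (10 - 1)) = 512 from by norm_num]
        by_cases hm : min_val ≤ (512:Int)
        · rw [if_pos ((⟨by omega, by omega, by omega⟩ : ((512:Int) ≤ value ∧ min_val ≤ 512 ∧ 512 ≤ max_val))), if_pos hm]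
        · rw [if_neg (show ¬((512:Int) ≤ value ∧ min_val ≤ 512 ∧ 512 ≤ max_val) from by omega),
              if_neg (show ¬((256:Int) ≤ value ∧ min_val ≤ 256 ∧ 256 ≤ max_val) from by omega),
              if_neg (show ¬((128:Int) ≤ value ∧ min_val ≤ 128 ∧ 128 ≤ max_val) from by omega),
              if_neg (show ¬((64:Int) ≤ value ∧ min_val ≤ 64 ∧ 64 ≤ max_val) from by omega),
              if_neg (show ¬((32:Int) ≤ value ∧ min_val ≤ 32 ∧ 32 ≤ max_val) from by omega),
              if_neg (show ¬((16:Int) ≤ value ∧ min_val ≤ 16 ∧ 16 ≤ max_val) from by omega),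
              if_neg (show ¬((8:Int) ≤ value ∧ min_val ≤ 8 ∧ 8 ≤ max_val) from by omega),
              if_neg (show ¬((4:Int) ≤ value ∧ min_val ≤ 4 ∧ 4 ≤ max_val) from by omega),
              if_neg (show ¬((2:Int) ≤ value ∧ min_val ≤ 2 ∧ 2 ≤ max_val) from by omega),
              if_neg (show ¬((1:Int) ≤ value ∧ min_val ≤ 1 ∧ 1 ≤ max_val) from by omega), if_neg hm]
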